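-- pv_equiv track=rewrite | github.com/idfkit/idfkit-docs | scripts/latex_preprocessor.py | _find_orphan_braces
-- ===== SOURCE A (Python) =====
-- def _find_orphan_braces(text: str) -> tuple[list[int], list[int]]:
--     """Scan *text* and return (unmatched_open_positions, unmatched_close_positions).
--
--     Escaped braces (``\\{``, ``\\}``) and LaTeX comment lines are skipped.
--     """
--     open_stack: list[int] = []
--     orphan_close: list[int] = []
--
--     i = 0
--     n = len(text)
--     while i < n:
--         ch = text[i]
--
--         # Skip LaTeX comments (% to end of line)
--         if ch == "%" and (i == 0 or text[i - 1] != "\\"):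
--             while i < n and text[i] != "\n":
--                 i += 1
--             continue
--
--         # Skip double-backslash (LaTeX linebreak \\) so that \\{ is not
--         # misread as \{ (escaped brace).  The { after \\ is a real brace.
--         if ch == "\\" and i + 1 < n and text[i + 1] == "\\":
--             i += 2
--             continue
--
--         # Skip escaped braces: \{ and \}
--         if ch == "\\" and i + 1 < n and text[i + 1] in "{}":
--             i += 2
--             continue
--
--         if ch == "{":
--             open_stack.append(i)
--         elif ch == "}":
--             if open_stack:
--                 open_stack.pop()
--             else:
--                 orphan_close.append(i)
--
--         i += 1
--
--     return open_stack, orphan_close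
-- ===== SOURCE B (Python) =====
-- def _find_orphan_braces(text: str) -> tuple[list[int], list[int]]:
--     """Single forward pass written as a three-state machine (NORMAL / COMMENT /
--     SKIP) over enumerate(text): no index jumping, no inner comment loop."""
--     NORMAL, COMMENT, SKIP = 0, 1, 2
--     state = NORMAL
--     open_stack: list[int] = []
--     orphan_close: list[int] = []
--     for i, ch in enumerate(text):
--         if state == COMMENT:
--             if ch == "\n":
--                 state = NORMAL
--         elif state == SKIP:
--             state = NORMAL
--         elif ch == "%" and (i == 0 or text[i - 1] != "\\"):
--             state = COMMENT
--         elif ch == "\\" and i + 1 < len(text) and text[i + 1] in "\\{}":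
--             state = SKIP
--         elif ch == "{":
--             open_stack.append(i)
--         elif ch == "}":
--             if open_stack:
--                 open_stack.pop()
--             else:
--                 orphan_close.append(i)
--     return open_stack, orphan_close
-- ===== Notes on version B (the rewrite author's own statement) =====
-- stated objective: alternative
-- what changed: Replaced A's index-jumping while loop (inner comment-skip loop, i+=2 escape skips) by a single fold over enumerate(text) driven by an explicit three-state machine (NORMAL/COMMENT/SKIP).
import Mathlib
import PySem

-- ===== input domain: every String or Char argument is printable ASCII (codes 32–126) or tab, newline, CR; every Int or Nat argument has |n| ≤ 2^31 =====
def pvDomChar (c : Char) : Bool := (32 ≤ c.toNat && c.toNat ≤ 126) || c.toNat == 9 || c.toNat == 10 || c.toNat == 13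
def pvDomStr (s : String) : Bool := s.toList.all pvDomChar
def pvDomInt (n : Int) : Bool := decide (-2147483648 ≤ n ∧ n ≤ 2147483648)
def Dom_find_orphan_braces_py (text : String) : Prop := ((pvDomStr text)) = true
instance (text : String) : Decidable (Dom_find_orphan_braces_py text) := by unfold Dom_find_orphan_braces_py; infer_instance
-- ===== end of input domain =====

-- B replaces A's index-jumping while loop (inner comment loop, i += 2 skips) by a single
-- fold over enumerate(text) driven by a three-state machine (objective: alternative, same cost).

-- ===== PORT A =====

-- inner `while i < n and text[i] != "\n"` comment-skip loop of A
def pvSkipNl (t : List Char) (i : Nat) : Nat :=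
  if _h : i < t.length then
    if t.getD i ' ' = '\n' then i else pvSkipNl t (i + 1)
  else i
termination_by t.length - i

theorem pvSkipNl_ge (t : List Char) (i : Nat) : i ≤ pvSkipNl t i := by
  fun_induction pvSkipNl t i <;> omega

theorem pvSkipNl_gt (t : List Char) (i : Nat) (h1 : i < t.length)
    (h2 : t.getD i ' ' ≠ '\n') : i + 1 ≤ pvSkipNl t i := by
  rw [pvSkipNl]
  simp only [dif_pos h1, if_neg h2]
  exact pvSkipNl_ge t (i + 1)

-- A's main while loop, threading open_stack and orphan_close through the scan
def pvLoopA (t : List Char) (i : Nat) (os oc : List Int) : List Int × List Int :=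
  if h : i < t.length then
    if hc : t.getD i ' ' = '%' ∧ (i = 0 ∨ t.getD (i - 1) ' ' ≠ '\\') then
      pvLoopA t (pvSkipNl t i) os oc
    else if t.getD i ' ' = '\\' ∧ i + 1 < t.length ∧ t.getD (i + 1) ' ' = '\\' then
      pvLoopA t (i + 2) os oc
    else if t.getD i ' ' = '\\' ∧ i + 1 < t.length ∧ (t.getD (i + 1) ' ' = '{' ∨ t.getD (i + 1) ' ' = '}') then
      pvLoopA t (i + 2) os oc
    else if t.getD i ' ' = '{' then
      pvLoopA t (i + 1) (os ++ [(i : Int)]) oc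
    else if t.getD i ' ' = '}' then
      if os ≠ [] then pvLoopA t (i + 1) os.dropLast oc
      else pvLoopA t (i + 1) os (oc ++ [(i : Int)])
    else
      pvLoopA t (i + 1) os oc
  else (os, oc)
termination_by t.length - i
decreasing_by
  · have := pvSkipNl_gt t i h (by rw [hc.1]; decide); omega
  all_goals omega

def find_orphan_braces_py (text : String) : List Int × List Int :=
  pvLoopA text.toList 0 [] []

-- ===== PORT B =====

-- the three states of Source B's machine (NORMAL, COMMENT, SKIP)
inductive PvMode where
  | normal | comment | skip
deriving DecidableEq, Repr

-- one iteration of Source B's `for i, ch in enumerate(text)` loop body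
def pvStepB (t : List Char) :
    PvMode × List Int × List Int → Int × Char → PvMode × List Int × List Int
  | (.comment, os, oc), (_, ch) => (if ch = '\n' then .normal else .comment, os, oc)
  | (.skip, os, oc), _ => (.normal, os, oc)
  | (.normal, os, oc), (i, ch) =>
    if ch = '%' ∧ (i = 0 ∨ t.getD (i - 1).toNat ' ' ≠ '\\') then (.comment, os, oc)
    else if ch = '\\' ∧ i + 1 < (t.length : Int) ∧
        (t.getD (i + 1).toNat ' ' = '\\' ∨ t.getD (i + 1).toNat ' ' = '{' ∨ t.getD (i + 1).toNat ' ' = '}') then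
      (.skip, os, oc)
    else if ch = '{' then (.normal, os ++ [i], oc)
    else if ch = '}' then
      if os ≠ [] then (.normal, os.dropLast, oc) else (.normal, os, oc ++ [i])
    else (.normal, os, oc)

def find_orphan_braces_py_alt (text : String) : List Int × List Int :=
  let r := (PySem.List.enumerate text.toList 0).foldl (pvStepB text.toList) (.normal, [], [])
  (r.2.1, r.2.2)

-- ===== PRECONDITION & SPEC =====
def Spec_find_orphan_braces_py (text : String) (out : List Int × List Int) : Prop := out = find_orphan_braces_py_alt text
instance (text : String) (out : List Int × List Int) : Decidable (Spec_find_orphan_braces_py text out) := by unfold Spec_find_orphan_braces_py; infer_instance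

-- ===== CLAIM =====
def Claim_equal_find_orphan_braces_py : Prop := ∀ (text : String), Dom_find_orphan_braces_py text → Spec_find_orphan_braces_py text (find_orphan_braces_py text)

-- ===== LEMMAS AND PROOFS =====

-- the enumerated suffix of the text starting at index i
def pvSuf (t : List Char) (i : Nat) : List (Int × Char) :=
  (PySem.List.enumerate t 0).drop i

theorem pvSuf_cons (t : List Char) (i : Nat) (h : i < t.length) :
    pvSuf t i = ((i : Int), t.getD i ' ') :: pvSuf t (i + 1) := by
  unfold pvSuf
  have hl : i < (PySem.List.enumerate t 0).length := by
    rwa [PySem.List.length_enumerate]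
  rw [List.drop_eq_getElem_cons hl, PySem.List.getElem_enumerate]
  simp [List.getD_eq_getElem?_getD, List.getElem?_eq_getElem h]

theorem pvSuf_nil (t : List Char) (i : Nat) (h : ¬ i < t.length) :
    pvSuf t i = [] := by
  unfold pvSuf
  apply List.drop_eq_nil_of_le
  rw [PySem.List.length_enumerate]; omega

-- Source B's COMMENT state walks exactly to the newline found by A's inner skip loop
theorem pvFold_comment (t : List Char) (i : Nat) (os oc : List Int) :
    ((pvSuf t i).foldl (pvStepB t) (.comment, os, oc)).2
      = ((pvSuf t (pvSkipNl t i)).foldl (pvStepB t) (.normal, os, oc)).2 := by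
  fun_induction pvSkipNl t i with
  | case1 i h hnl =>
      -- t[i] = newline : both states take the same step at it
      rw [pvSuf_cons t i h]
      simp only [List.foldl_cons]
      have e1 : pvStepB t (.comment, os, oc) ((i : Int), t.getD i ' ')
          = (.normal, os, oc) := by
        simp only [pvStepB]; rw [if_pos hnl]
      have e2 : pvStepB t (.normal, os, oc) ((i : Int), t.getD i ' ')
          = (.normal, os, oc) := by
        simp only [pvStepB]
        rw [if_neg ?c1, if_neg ?c2, if_neg ?c3, if_neg ?c4]
        case c1 => rintro ⟨hp, -⟩; rw [hnl] at hp; exact absurd hp (by decide)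
        case c2 => rintro ⟨hp, -⟩; rw [hnl] at hp; exact absurd hp (by decide)
        case c3 => rw [hnl]; decide
        case c4 => rw [hnl]; decide
      rw [e1, e2]
  | case2 i h hnl ih =>
      rw [pvSuf_cons t i h]
      simp only [List.foldl_cons]
      have e1 : pvStepB t (.comment, os, oc) ((i : Int), t.getD i ' ')
          = (.comment, os, oc) := by
        simp only [pvStepB]; rw [if_neg hnl]
      rw [e1]; exact ih
  | case3 i h =>
      rw [pvSuf_nil t i h]; rfl

-- ¬(B's %-guard) from ¬(A's %-guard), bridging the Int/Nat index forms
theorem pvNotPercent (t : List Char) (i : Nat)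
    (hc : ¬(t.getD i ' ' = '%' ∧ (i = 0 ∨ t.getD (i - 1) ' ' ≠ '\\'))) :
    ¬(t.getD i ' ' = '%' ∧ ((i : Int) = 0 ∨ t.getD ((i : Int) - 1).toNat ' ' ≠ '\\')) := by
  rintro ⟨hp, hd⟩
  apply hc
  refine ⟨hp, ?_⟩
  rcases hd with h0 | h0
  · left; omega
  · right; rwa [show ((i : Int) - 1).toNat = i - 1 by omega] at h0

-- ¬(B's escape-guard) from the negations of A's two escape guards
theorem pvNotEscape (t : List Char) (i : Nat)
    (h2 : ¬(t.getD i ' ' = '\\' ∧ i + 1 < t.length ∧ t.getD (i + 1) ' ' = '\\'))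
    (h3 : ¬(t.getD i ' ' = '\\' ∧ i + 1 < t.length ∧ (t.getD (i + 1) ' ' = '{' ∨ t.getD (i + 1) ' ' = '}'))) :
    ¬(t.getD i ' ' = '\\' ∧ (i : Int) + 1 < (t.length : Int) ∧
      (t.getD ((i : Int) + 1).toNat ' ' = '\\' ∨ t.getD ((i : Int) + 1).toNat ' ' = '{' ∨ t.getD ((i : Int) + 1).toNat ' ' = '}')) := by
  rintro ⟨hb, hlt, hn⟩
  rw [show ((i : Int) + 1).toNat = i + 1 by omega] at hn
  have hlt' : i + 1 < t.length := by exact_mod_cast hlt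
  rcases hn with hn | hn | hn
  · exact h2 ⟨hb, hlt', hn⟩
  · exact h3 ⟨hb, hlt', Or.inl hn⟩
  · exact h3 ⟨hb, hlt', Or.inr hn⟩

-- A's interleaved loop equals Source B's state-machine fold over the remaining suffix
theorem pvLoopA_eq_fold (t : List Char) (i : Nat) (os oc : List Int) :
    pvLoopA t i os oc
      = (let r := (pvSuf t i).foldl (pvStepB t) (.normal, os, oc); (r.2.1, r.2.2)) := by
  fun_induction pvLoopA t i os oc with
  | case1 i os oc h hc ih =>
      rw [pvSuf_cons t i h]
      simp only [List.foldl_cons]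
      have e1 : pvStepB t (.normal, os, oc) ((i : Int), t.getD i ' ')
          = (.comment, os, oc) := by
        simp only [pvStepB]
        refine if_pos ⟨hc.1, ?_⟩
        rcases hc.2 with h0 | hp
        · left; omega
        · right; rwa [show ((i : Int) - 1).toNat = i - 1 by omega]
      have hskip : pvSkipNl t i = pvSkipNl t (i + 1) := by
        rw [pvSkipNl, dif_pos h, if_neg (by rw [hc.1]; decide)]
      rw [e1, ih, hskip]
      dsimp only
      rw [← pvFold_comment t (i + 1) os oc]
  | case2 i os oc h hc h2 ih =>
      rw [pvSuf_cons t i h]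
      simp only [List.foldl_cons]
      have e1 : pvStepB t (.normal, os, oc) ((i : Int), t.getD i ' ')
          = (.skip, os, oc) := by
        simp only [pvStepB]
        rw [if_neg ?c1]
        case c1 => rintro ⟨hp, -⟩; rw [h2.1] at hp; exact absurd hp (by decide)
        refine if_pos ⟨h2.1, by exact_mod_cast h2.2.1, ?_⟩
        rw [show ((i : Int) + 1).toNat = i + 1 by omega]
        exact Or.inl h2.2.2
      rw [e1, pvSuf_cons t (i + 1) h2.2.1]
      simp only [List.foldl_cons]
      have e2 : pvStepB t (.skip, os, oc) (((i + 1 : Nat) : Int), t.getD (i + 1) ' ')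
          = (.normal, os, oc) := rfl
      rw [e2]; exact ih
  | case3 i os oc h hc h2 h3 ih =>
      rw [pvSuf_cons t i h]
      simp only [List.foldl_cons]
      have e1 : pvStepB t (.normal, os, oc) ((i : Int), t.getD i ' ')
          = (.skip, os, oc) := by
        simp only [pvStepB]
        rw [if_neg ?c1]
        case c1 => rintro ⟨hp, -⟩; rw [h3.1] at hp; exact absurd hp (by decide)
        refine if_pos ⟨h3.1, by exact_mod_cast h3.2.1, ?_⟩
        rw [show ((i : Int) + 1).toNat = i + 1 by omega]
        exact Or.inr h3.2.2
      rw [e1, pvSuf_cons t (i + 1) h3.2.1]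
      simp only [List.foldl_cons]
      have e2 : pvStepB t (.skip, os, oc) (((i + 1 : Nat) : Int), t.getD (i + 1) ' ')
          = (.normal, os, oc) := rfl
      rw [e2]; exact ih
  | case4 i os oc h hc h2 h3 h4 ih =>
      rw [pvSuf_cons t i h]
      simp only [List.foldl_cons]
      have e1 : pvStepB t (.normal, os, oc) ((i : Int), t.getD i ' ')
          = (.normal, os ++ [(i : Int)], oc) := by
        simp only [pvStepB]
        rw [if_neg (pvNotPercent t i hc), if_neg (pvNotEscape t i h2 h3), if_pos h4]
      rw [e1]; exact ih
  | case5 i os oc h hc h2 h3 h4 h5 h6 ih =>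
      rw [pvSuf_cons t i h]
      simp only [List.foldl_cons]
      have e1 : pvStepB t (.normal, os, oc) ((i : Int), t.getD i ' ')
          = (.normal, os.dropLast, oc) := by
        simp only [pvStepB]
        rw [if_neg (pvNotPercent t i hc), if_neg (pvNotEscape t i h2 h3), if_neg h4,
          if_pos h5, if_pos h6]
      rw [e1]; exact ih
  | case6 i os oc h hc h2 h3 h4 h5 h6 ih =>
      rw [pvSuf_cons t i h]
      simp only [List.foldl_cons]
      have e1 : pvStepB t (.normal, os, oc) ((i : Int), t.getD i ' ')
          = (.normal, os, oc ++ [(i : Int)]) := by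
        simp only [pvStepB]
        rw [if_neg (pvNotPercent t i hc), if_neg (pvNotEscape t i h2 h3), if_neg h4,
          if_pos h5, if_neg h6]
      rw [e1]; exact ih
  | case7 i os oc h hc h2 h3 h4 h5 ih =>
      rw [pvSuf_cons t i h]
      simp only [List.foldl_cons]
      have e1 : pvStepB t (.normal, os, oc) ((i : Int), t.getD i ' ')
          = (.normal, os, oc) := by
        simp only [pvStepB]
        rw [if_neg (pvNotPercent t i hc), if_neg (pvNotEscape t i h2 h3), if_neg h4, if_neg h5]
      rw [e1]; exact ih
  | case8 i os oc h =>
      rw [pvSuf_nil t i h]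
      rfl

-- ===== VERDICT =====
theorem find_orphan_braces_py_spec : Claim_equal_find_orphan_braces_py := by
  intro text _
  unfold Spec_find_orphan_braces_py find_orphan_braces_py find_orphan_braces_py_alt
  have : pvSuf text.toList 0 = PySem.List.enumerate text.toList 0 := rfl
  rw [pvLoopA_eq_fold text.toList 0 [] [], this]
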